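-- pv_equiv track=rewrite | github.com/CarlosOdetteDLCL080301/Criptograf-a | CifradoLucifer/CifradoLucifer.py | intercambiarIndices
-- ===== SOURCE A (Python) =====
-- def intercambiarIndices(arreglo):
--     if len(arreglo) % 2 == 0:
--         for i in range(0, len(arreglo), 2):
--             a = arreglo[i]
--             b = arreglo[i + 1]
--             arreglo[i] = b
--             arreglo[i + 1] = a
--     return arreglo
-- ===== SOURCE B (Python) =====
-- def intercambiarIndices(arreglo):
--     if len(arreglo) % 2 == 0:
--         arreglo[0::2], arreglo[1::2] = arreglo[1::2], arreglo[0::2]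
--     return arreglo
-- ===== Notes on version B (the rewrite author's own statement) =====
-- stated objective: idiomatic
-- what changed: Replaces the index-stepping per-pair swap loop (four indexed reads/writes per iteration) with a single simultaneous strided slice assignment: the even-index and odd-index subsequences are extracted as whole slices and written back crosswise, so no per-pair handling remains.
import Mathlib
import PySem

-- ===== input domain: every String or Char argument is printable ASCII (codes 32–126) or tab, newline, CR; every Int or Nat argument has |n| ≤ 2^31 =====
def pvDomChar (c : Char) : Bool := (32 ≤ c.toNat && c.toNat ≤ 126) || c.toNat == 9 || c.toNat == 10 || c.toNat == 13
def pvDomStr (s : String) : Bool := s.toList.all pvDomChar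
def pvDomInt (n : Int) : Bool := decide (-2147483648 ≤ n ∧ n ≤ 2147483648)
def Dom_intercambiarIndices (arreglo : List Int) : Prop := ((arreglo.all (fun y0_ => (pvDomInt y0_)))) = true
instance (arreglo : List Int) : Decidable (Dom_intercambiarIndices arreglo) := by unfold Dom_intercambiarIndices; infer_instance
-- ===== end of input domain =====

-- B replaces A's index-stepping per-pair swap loop with one simultaneous strided
-- slice assignment (arreglo[0::2], arreglo[1::2] = arreglo[1::2], arreglo[0::2]);
-- idiomatic, same O(n) cost.  Both A and B mutate the argument list in place in
-- Python; the equivalence proved here is about the returned value.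

-- ===== PORT A =====
-- one iteration of A's for-loop body: a = arr[i]; b = arr[i+1]; arr[i] = b; arr[i+1] = a
def pvSwapStepA (arr : List Int) (i : Int) : List Int :=
  let a := PySem.List.pyGetD arr i 0
  let b := PySem.List.pyGetD arr (i + 1) 0
  PySem.List.pySetD (PySem.List.pySetD arr i b) (i + 1) a

def intercambiarIndices (arreglo : List Int) : List Int :=
  if (arreglo.length : Int) % 2 = 0 then
    (PySem.List.pyRange 0 (arreglo.length : Int) 2).foldl pvSwapStepA arreglo
  else arreglo

-- ===== PORT B =====
-- xs[k::2] as a list: every second element starting at the head (xs[1::2] = pvStride2 xs.tail)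
def pvStride2 : List Int → List Int
  | [] => []
  | a :: t => a :: pvStride2 t.tail
termination_by xs => xs.length
decreasing_by simp [List.length_tail]

-- the simultaneous slice assignment arreglo[0::2], arreglo[1::2] = odds, evens:
-- write the first list back at even positions and the second at odd positions
def pvAssignStrides : List Int → List Int → List Int
  | a :: as_, b :: bs => a :: b :: pvAssignStrides as_ bs
  | _, _ => []

def intercambiarIndices_alt (arreglo : List Int) : List Int :=
  if (arreglo.length : Int) % 2 = 0 then
    pvAssignStrides (pvStride2 arreglo.tail) (pvStride2 arreglo)
  else arreglo

-- ===== PRECONDITION & SPEC =====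
def Spec_intercambiarIndices (arreglo : List Int) (out : List Int) : Prop := out = intercambiarIndices_alt arreglo
instance (arreglo : List Int) (out : List Int) : Decidable (Spec_intercambiarIndices arreglo out) := by unfold Spec_intercambiarIndices; infer_instance

-- ===== CLAIM (what is proved, stated in full; the proofs are below) =====
def Claim_equal_intercambiarIndices : Prop := ∀ (arreglo : List Int), Dom_intercambiarIndices arreglo → Spec_intercambiarIndices arreglo (intercambiarIndices arreglo)

-- ===== LEMMAS AND PROOFS =====

-- proof-only normal form: the adjacent-pair swap of a list (leftover element dropped)
def pvSwapPairs : List Int → List Int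
  | a :: b :: t => b :: a :: pvSwapPairs t
  | _ => []

-- B's crosswise stride write-back is the adjacent-pair swap
theorem pvB_eq : (xs : List Int) →
    pvAssignStrides (pvStride2 xs.tail) (pvStride2 xs) = pvSwapPairs xs
  | [] => by simp [pvStride2, pvAssignStrides, pvSwapPairs]
  | [x] => by simp [pvStride2, pvAssignStrides, pvSwapPairs]
  | a :: b :: t => by
    simp only [pvStride2, pvSwapPairs, List.tail_cons, pvAssignStrides]
    rw [pvB_eq t]

-- one loop step of A at index pre.length on pre ++ a :: b :: t swaps a and b
theorem pvSwapStepA_at (pre : List Int) (a b : Int) (t : List Int) :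
    pvSwapStepA (pre ++ a :: b :: t) (pre.length : Int) = pre ++ b :: a :: t := by
  have h1 : PySem.List.pyGetD (pre ++ a :: b :: t) (pre.length : Int) 0 = a := by
    simp [PySem.List.pyGetD_natCast, List.getD_eq_getElem?_getD]
  have h2 : PySem.List.pyGetD (pre ++ a :: b :: t) ((pre.length : Int) + 1) 0 = b := by
    have he : ((pre.length : Int) + 1) = ((pre.length + 1 : Nat) : Int) := by push_cast; ring
    rw [he, PySem.List.pyGetD_natCast, List.getD_eq_getElem?_getD,
      List.getElem?_append_right (by omega)]
    simp
  show PySem.List.pySetD (PySem.List.pySetD (pre ++ a :: b :: t) (pre.length : Int)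
      (PySem.List.pyGetD (pre ++ a :: b :: t) ((pre.length : Int) + 1) 0)) ((pre.length : Int) + 1)
      (PySem.List.pyGetD (pre ++ a :: b :: t) (pre.length : Int) 0) = pre ++ b :: a :: t
  rw [h1, h2]
  have hs1 : PySem.List.pySetD (pre ++ a :: b :: t) (pre.length : Int) b
      = pre ++ b :: b :: t := by
    rw [PySem.List.pySetD_natCast, List.set_append_right _ _ (Nat.le_refl _)]
    simp
  rw [hs1]
  have he : ((pre.length : Int) + 1) = ((pre.length + 1 : Nat) : Int) := by push_cast; ring
  rw [he, PySem.List.pySetD_natCast, List.set_append_right _ _ (by omega)]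
  simp

-- A's whole loop, generalized over an already-processed prefix
theorem pvFoldA (m : Nat) : ∀ (pre t : List Int), t.length = 2 * m →
    ((List.range m).map (fun k : Nat => ((pre.length : Int) + 2 * (k : Int)))).foldl pvSwapStepA (pre ++ t)
      = pre ++ pvSwapPairs t := by
  induction m with
  | zero =>
    intro pre t ht
    have : t = [] := List.eq_nil_of_length_eq_zero (by omega)
    subst this
    simp [pvSwapPairs]
  | succ m ih =>
    intro pre t ht
    match t with
    | a :: b :: t' =>
      have ht' : t'.length = 2 * m := by simp at ht; omega
      rw [List.range_succ_eq_map]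
      simp only [List.map_cons, List.map_map, List.foldl_cons]
      have hstep : pvSwapStepA (pre ++ a :: b :: t') ((pre.length : Int) + 2 * ((0 : Nat) : Int))
          = pre ++ b :: a :: t' := by
        simpa using pvSwapStepA_at pre a b t'
      rw [hstep]
      have hfun : ((fun k : Nat => ((pre.length : Int) + 2 * (k : Int))) ∘ Nat.succ)
          = fun k : Nat => (((pre ++ [b, a]).length : Int) + 2 * (k : Int)) := by
        funext k
        simp [Function.comp, Nat.succ_eq_add_one]
        ring
      have hassoc : pre ++ b :: a :: t' = (pre ++ [b, a]) ++ t' := by simp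
      rw [hfun, hassoc, ih (pre ++ [b, a]) t' ht']
      simp [pvSwapPairs]
    | [] => simp at ht
    | [a] => simp at ht; omega

-- range(0, 2*m, 2) is the doubled List.range m
theorem pvRange_two (m : Nat) :
    PySem.List.pyRange 0 ((2 * m : Nat) : Int) 2
      = (List.range m).map (fun k : Nat => ((0 : Int) + 2 * (k : Int))) := by
  rw [PySem.List.pyRange_of_pos 0 ((2 * m : Nat) : Int) (by norm_num)]
  have hc : (if (0:Int) < ((2 * m : Nat) : Int)
      then ((((2 * m : Nat) : Int) - 0 + 2 - 1) / 2).toNat else 0) = m := by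
    by_cases hm : m = 0
    · subst hm; simp
    · rw [if_pos (by push_cast; omega)]
      have h : ((2 * m : Nat) : Int) - 0 + 2 - 1 = 2 * (m : Int) + 1 := by push_cast; ring
      rw [h]; omega
  rw [hc]

-- ===== VERDICT (by name: the statement is the Claim_ definition above) =====
theorem intercambiarIndices_spec : Claim_equal_intercambiarIndices := by
  intro arreglo _
  unfold Spec_intercambiarIndices intercambiarIndices intercambiarIndices_alt
  by_cases h : ((arreglo.length : Int) % 2 = 0)
  · rw [if_pos h, if_pos h, pvB_eq]
    obtain ⟨m, hm⟩ : ∃ m, arreglo.length = 2 * m := by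
      have : arreglo.length % 2 = 0 := by omega
      exact ⟨arreglo.length / 2, by omega⟩
    rw [hm, pvRange_two m]
    have := pvFoldA m [] arreglo hm
    simpa using this
  · rw [if_neg h, if_neg h]
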